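-- pv_equiv track=rewrite | github.com/ismpere/Python-Examples | Práctica 1/practice-python-1-ismpere.py | encuentra_maximo
-- ===== SOURCE A (Python) =====
-- def encuentra_maximo(sopa):
--     maximo = -1
--     numeros = []
--     matriz = to_matriz(sopa)
--
--     # Extraigo los elementos de las filas
--     for i in range(len(matriz)):
--         n = int(''.join(str(j) for j in matriz[i])) # Paso los elementos de la fila a un entero
--         n_invertido = int(str(n)[::-1]) # Invierto el numero que acabo de sacar de la fila, ya que es tambien una posible solucion
--
--         numeros.extend([n,n_invertido]) # Aniado el numero obtenido en cada fila, y su inverso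
--
--     diag1 = []
--     diag2 = []
--     # Extraigo los elementos de las columnas y diagonales
--     for j in range(len(matriz)):
--         aux = []
--         for i in range(len(matriz)):
--             aux.append(matriz[i][j])
--             # Evaluamos las posiciones para saber si pertenecen a alguna diagonal
--             if i==j:
--                 diag1.append(matriz[i][j])
--             if i == abs(j-(len(matriz)-1)):
--                 diag2.append(matriz[i][j])
--
--         n = int(''.join(str(j) for j in aux)) # Paso los elementos de la columna a un entero
--         n_invertido = int(str(n)[::-1]) # Invierto el numero que acabo de sacar de la columna, ya que es tambien una posible solucion
--
--         numeros.extend([n,n_invertido]) # Aniado el numero obtenido en cada columna, y su inverso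
--
--     # Extraemos los enteros de las diagonales
--     d1 = int(''.join(str(j) for j in diag1)) # Paso los elementos de la primera diagonal a un entero
--     d2 = int(''.join(str(j) for j in diag2)) # Paso los elementos de la segunda diagonal a un entero
--
--     d1_invertido = int(str(d1)[::-1]) # Invierto el numero que acabo de sacar de la primera diagonal, ya que es tambien una posible solucion
--     d2_invertido = int(str(d2)[::-1]) # Invierto el numero que acabo de sacar de la segunda diagonal, ya que es tambien una posible solucion
--
--     numeros.extend([d1,d2,d1_invertido, d2_invertido]) # Aniado el numero obtenido en cada diagonal, y su inverso
--
--     # Me quedo solo con los impares y extraigo el mayor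
--     impares = [x for x in numeros if x%2!=0]
--     if(len(impares)>0):
--         maximo = max(impares)
--     # Si no hay ningun numero impar, compruebo con los de menor dimension que la matriz
--     else:
--         for i in range (len(matriz)):
--             numeros = [n//10 for n in numeros] # Elimino el ultimo digito de todos los numeros de la matriz
--             impares = [x for x in numeros if x%2!=0]
--             if(len(impares)>0):
--                 maximo = max(impares)
--                 break
--
--     return maximo
--
-- def to_matriz(sopa):
--     lista = sopa.split("\n")
--
--     # Inicializamos la matriz y la rellenamos
--     matriz = []
--     for i in range(len(lista)):
--         matriz.append([])
--         for j in range(len(lista)):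
--             matriz[i].append(None)
--             matriz[i][j] = lista[i][j]
--
--     return matriz
-- ===== SOURCE B (Python) =====
-- def encuentra_maximo(sopa):
--     lines = sopa.split("\n")
--     n = len(lines)
--     grid = [ln[:n] for ln in lines]
--     bases = list(grid)
--     bases += [''.join(ln[j] for ln in grid) for j in range(n)]
--     bases.append(''.join(grid[i][i] for i in range(n)))
--     bases.append(''.join(grid[n - 1 - j][j] for j in range(n)))
--     best = None  # (level, value): fewest digits stripped first, then largest value
--     for s in bases:
--         for x in (int(s), int(str(int(s))[::-1])):
--             y, k = x, 0
--             while k <= n and y % 2 == 0: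
--                 y //= 10
--                 k += 1
--             if k <= n and (best is None or k < best[0] or (k == best[0] and y > best[1])):
--                 best = (k, y)
--     return -1 if best is None else best[1]
-- ===== Notes on version B (the rewrite author's own statement) =====
-- stated objective: alternative
-- what changed: B reads rows/columns/diagonals off the split lines by slicing and direct indexing instead of A's cell-by-cell None-filled matrix build, and replaces A's repeated strip-last-digit-and-rescan fallback over a rebuilt list by a single pass that computes for each candidate the minimal number of digit strips making it odd, keeping the (fewest-strips, largest-value) winner.
-- outside the precondition, e.g. on encuentra_maximo(' 1\n11'): A returns 11, B returns 11
import Mathlib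
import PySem

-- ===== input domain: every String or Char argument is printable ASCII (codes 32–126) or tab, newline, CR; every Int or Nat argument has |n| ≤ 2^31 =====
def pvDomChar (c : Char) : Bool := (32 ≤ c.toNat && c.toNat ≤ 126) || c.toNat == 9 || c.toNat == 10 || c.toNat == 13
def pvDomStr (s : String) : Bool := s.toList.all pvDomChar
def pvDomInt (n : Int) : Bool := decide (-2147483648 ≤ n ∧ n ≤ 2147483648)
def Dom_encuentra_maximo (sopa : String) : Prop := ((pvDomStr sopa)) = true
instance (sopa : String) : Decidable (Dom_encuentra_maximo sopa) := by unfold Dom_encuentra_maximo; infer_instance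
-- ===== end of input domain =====

-- B replaces A's repeated strip-the-last-digit-and-rescan fallback by one pass that finds, for each
-- candidate number, the fewest digit strips making it odd, keeping the (fewest strips, largest value)
-- winner; candidates are read off the grid by slicing and direct indexing instead of A's cell-by-cell matrix build.

-- sopa.split("\n"), on code points (Python strings ↔ List Char)
def pvLines (sopa : String) : List (List Char) :=
  (PySem.Chars.split? sopa.toList ['\n']).getD []

-- x % 2 != 0
def pvOdd (x : Int) : Bool := PySem.Int.mod x 2 != 0

-- int(''.join(cs)); the .getD default is unreachable under Pre_ (digit grids)
def pvInt (cs : List Char) : Int := (PySem.Int.ofChars? cs).getD 0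

-- int(str(v)[::-1]); s[::-1] is reverse (PySem.List.slice?_none_none_neg_one); default unreachable under Pre_
def pvRev (v : Int) : Int := (PySem.Int.ofChars? (PySem.Int.toChars v).reverse).getD 0

-- ===== PORT A =====
-- Python appends None then immediately overwrites matriz[i][j]; ported as building row j-by-j then appending it.
def to_matriz (sopa : String) : List (List Char) :=
  let lista := pvLines sopa
  (PySem.List.pyRange 0 (PySem.List.len lista)).foldl
    (fun matriz i =>
      matriz ++ [(PySem.List.pyRange 0 (PySem.List.len lista)).foldl
        (fun row j => row ++ [PySem.List.pyGetD (PySem.List.pyGetD lista i []) j ' ']) []])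
    []

-- the fallback loop: for i in range(len(matriz)): strip last digit of every number, rescan for odds
def pvLevelLoop (nums : List Int) : Nat → Int
  | 0 => -1
  | m + 1 =>
    let nums' := nums.map fun x => PySem.Int.floordiv x 10
    let imp := nums'.filter pvOdd
    if imp.length > 0 then (PySem.List.max? imp (fun y => y)).getD (-1)
    else pvLevelLoop nums' m

def encuentra_maximo (sopa : String) : Int :=
  let matriz := to_matriz sopa
  let numeros := (PySem.List.pyRange 0 (PySem.List.len matriz)).foldl
    (fun nums i =>
      let v := pvInt (PySem.List.pyGetD matriz i [])
      nums ++ [v, pvRev v]) []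
  let st := (PySem.List.pyRange 0 (PySem.List.len matriz)).foldl
    (fun (st : List Int × List Char × List Char) j =>
      let inner := (PySem.List.pyRange 0 (PySem.List.len matriz)).foldl
        (fun (s : List Char × List Char × List Char) i =>
          (s.1 ++ [PySem.List.pyGetD (PySem.List.pyGetD matriz i []) j ' '],
           if i == j then s.2.1 ++ [PySem.List.pyGetD (PySem.List.pyGetD matriz i []) j ' '] else s.2.1,
           if i == |j - (PySem.List.len matriz - 1)| then s.2.2 ++ [PySem.List.pyGetD (PySem.List.pyGetD matriz i []) j ' '] else s.2.2))
        (([] : List Char), st.2.1, st.2.2)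
      let v := pvInt inner.1
      (st.1 ++ [v, pvRev v], inner.2.1, inner.2.2))
    (numeros, ([] : List Char), ([] : List Char))
  let d1 := pvInt st.2.1
  let d2 := pvInt st.2.2
  let numeros2 := st.1 ++ [d1, d2, pvRev d1, pvRev d2]
  let impares := numeros2.filter pvOdd
  if impares.length > 0 then (PySem.List.max? impares (fun y => y)).getD (-1)
  else pvLevelLoop numeros2 (to_matriz sopa).length

-- ===== PORT B =====
-- while k <= n and y % 2 == 0: y //= 10; k += 1 — returns (strip count, stripped value) iff an odd value appears within fuel steps
def pvFirstOdd (x : Int) : Nat → Option (Nat × Int)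
  | 0 => none
  | f + 1 =>
    if pvOdd x then some (0, x)
    else (pvFirstOdd (PySem.Int.floordiv x 10) f).map fun p => (p.1 + 1, p.2)

-- if k <= n and (best is None or k < best[0] or (k == best[0] and y > best[1])): best = (k, y)
def pvUpd (fuel : Nat) (best : Option (Nat × Int)) (x : Int) : Option (Nat × Int) :=
  match pvFirstOdd x fuel with
  | none => best
  | some (k, y) =>
    match best with
    | none => some (k, y)
    | some (bk, bv) => if k < bk ∨ (k = bk ∧ bv < y) then some (k, y) else some (bk, bv)

def encuentra_maximo_alt (sopa : String) : Int :=
  let lines := pvLines sopa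
  let n := lines.length
  let grid := lines.map fun ln => PySem.List.slice ln none (some (n : Int))
  let bases := grid
    ++ (PySem.List.pyRange 0 (n : Int)).map (fun j => grid.map fun ln => PySem.List.pyGetD ln j ' ')
    ++ [(PySem.List.pyRange 0 (n : Int)).map fun i =>
          PySem.List.pyGetD (PySem.List.pyGetD grid i []) i ' ',
        (PySem.List.pyRange 0 (n : Int)).map fun j =>
          PySem.List.pyGetD (PySem.List.pyGetD grid ((n : Int) - 1 - j) []) j ' ']
  let best := bases.foldl (fun b s =>
      let x := pvInt s
      pvUpd (n + 1) (pvUpd (n + 1) b x) (pvRev x)) none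
  match best with
  | none => -1
  | some (_, v) => v

-- ===== PRECONDITION & SPEC =====
-- Pre_ is the natural domain of the puzzle: an n-line grid whose first n characters of every line are
-- digits, each line at least n long (A raises IndexError on shorter lines and ValueError on non-digit
-- grids; it also happens to return on some grids with blanks/signs that int() tolerates — excluded, see claim).
def Pre_encuentra_maximo (sopa : String) : Prop :=
  ((pvLines sopa).all fun ln =>
    decide ((pvLines sopa).length ≤ ln.length) &&
    (ln.take (pvLines sopa).length).all (fun c => c.isDigit)) = true
instance (sopa : String) : Decidable (Pre_encuentra_maximo sopa) := by
  unfold Pre_encuentra_maximo; infer_instance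

def pvWitness_encuentra_maximo : String := "13\n24"

def Spec_encuentra_maximo (sopa : String) (out : Int) : Prop := out = encuentra_maximo_alt sopa
instance (sopa : String) (out : Int) : Decidable (Spec_encuentra_maximo sopa out) := by
  unfold Spec_encuentra_maximo; infer_instance

-- ===== CLAIM (what is proved, stated in full; the proofs are below) =====
def Claim_equal_encuentra_maximo : Prop :=
  ∀ (sopa : String), Dom_encuentra_maximo sopa → Pre_encuentra_maximo sopa →
    Spec_encuentra_maximo sopa (encuentra_maximo sopa)

-- ===== LEMMAS AND PROOFS =====

-- A's selection phase, levels checked before shifting: scan nums (m+1) looks at levels 0..m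
def pvScan (nums : List Int) : Nat → Int
  | 0 => -1
  | m + 1 =>
    let imp := nums.filter pvOdd
    if imp.length > 0 then (PySem.List.max? imp (fun y => y)).getD (-1)
    else pvScan (nums.map fun x => PySem.Int.floordiv x 10) m

theorem pvScan_succ (nums : List Int) (m : Nat) :
    pvScan nums (m + 1)
      = if (nums.filter pvOdd).length > 0 then
          (PySem.List.max? (nums.filter pvOdd) (fun y => y)).getD (-1)
        else pvScan (nums.map fun x => PySem.Int.floordiv x 10) m := rfl

-- the value of the zero-strip component of a best accumulator
def pvZ : Option (Nat × Int) → Option Int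
  | some (0, v) => some v
  | _ => none

theorem pvLevelLoop_eq_pvScan (m : Nat) : ∀ nums : List Int,
    pvLevelLoop nums m = pvScan (nums.map fun x => PySem.Int.floordiv x 10) m := by
  induction m with
  | zero => intro nums; rfl
  | succ m ih =>
    intro nums
    simp only [pvLevelLoop, pvScan]
    split
    · rfl
    · exact ih _

theorem pvFirstOdd_of_odd (x : Int) (f : Nat) (h : pvOdd x = true) :
    pvFirstOdd x (f + 1) = some (0, x) := by simp [pvFirstOdd, h]

theorem pvFirstOdd_of_even (x : Int) (f : Nat) (h : pvOdd x = false) :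
    pvFirstOdd x (f + 1)
      = (pvFirstOdd (PySem.Int.floordiv x 10) f).map fun p => (p.1 + 1, p.2) := by
  simp [pvFirstOdd, h]

-- one step on an odd candidate: land on level 0 and take the max with the level-0 value
theorem pvUpd_odd_step (f : Nat) (b : Option (Nat × Int)) (x : Int) (hx : pvOdd x = true) :
    pvUpd (f + 1) b x
      = some (0, match pvZ b with | some bv => max bv x | none => x) := by
  simp only [pvUpd, pvFirstOdd_of_odd x f hx]
  cases b with
  | none => simp [pvZ]
  | some q =>
    rcases q with ⟨bk, bv⟩
    cases bk with
    | zero =>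
      simp only [pvZ]
      by_cases h1 : bv < x
      · rw [if_pos (by simpa using h1), max_eq_right h1.le]
      · rw [if_neg (by simpa using h1), max_eq_left (by omega)]
    | succ bk' =>
      have hc : (0 < bk' + 1 ∨ (0 = bk' + 1 ∧ bv < x)) := Or.inl (Nat.succ_pos _)
      simp [hc, pvZ]

-- one step on an even candidate keeps a level-0 accumulator unchanged
theorem pvUpd_even_zero (f : Nat) (v : Int) (x : Int) (hx : pvOdd x = false) :
    pvUpd (f + 1) (some (0, v)) x = some (0, v) := by
  simp only [pvUpd, pvFirstOdd_of_even x f hx]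
  cases pvFirstOdd (PySem.Int.floordiv x 10) f with
  | none => rfl
  | some p =>
    rcases p with ⟨k, y⟩
    have hc : ¬ (k + 1 < 0 ∨ (k + 1 = 0 ∧ v < y)) := by omega
    simp [hc]

-- fold of pvUpd over t with a zero-level accumulator: running max over the odd elements
theorem pvUpd_foldl_zero (f : Nat) : ∀ (t : List Int) (v : Int),
    t.foldl (pvUpd (f + 1)) (some (0, v)) = some (0, (t.filter pvOdd).foldl max v) := by
  intro t
  induction t with
  | nil => intro v; rfl
  | cons x r ih =>
    intro v
    rw [List.foldl_cons]
    by_cases hx : pvOdd x = true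
    · have hstep := pvUpd_odd_step f (some (0, v)) x hx
      simp only [pvZ] at hstep
      rw [hstep, ih]
      simp [List.filter_cons, hx]
    · have hx' : pvOdd x = false := by simpa using hx
      rw [pvUpd_even_zero f v x hx', ih]
      simp [List.filter_cons, hx']

-- an even element never changes the zero-level component of the accumulator
theorem pvZ_pvUpd_even (f : Nat) (b : Option (Nat × Int)) (x : Int) (hx : pvOdd x = false) :
    pvZ (pvUpd (f + 1) b x) = pvZ b := by
  simp only [pvUpd, pvFirstOdd_of_even x f hx]
  cases pvFirstOdd (PySem.Int.floordiv x 10) f with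
  | none => rfl
  | some p =>
    cases b with
    | none => simp [pvZ]
    | some q =>
      rcases q with ⟨bk, bv⟩
      simp only [Option.map_some]
      split
      · rename_i h
        rcases h with h | h
        · have : bk ≠ 0 := by omega
          simp [pvZ, this]
        · have : bk ≠ 0 := by omega
          simp [pvZ, this]
      · rfl

-- with at least one odd element, the fold lands on level 0 with the max of the odds (folded into pvZ b)
theorem pvUpd_foldl_of_odd (f : Nat) : ∀ (t : List Int) (b : Option (Nat × Int)),
    (t.filter pvOdd).length > 0 →
    t.foldl (pvUpd (f + 1)) b
      = some (0, match pvZ b with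
          | some bv => (t.filter pvOdd).foldl max bv
          | none => ((t.filter pvOdd).tail).foldl max ((t.filter pvOdd).headI)) := by
  intro t
  induction t with
  | nil => intro b h; simp at h
  | cons x r ih =>
    intro b h
    rw [List.foldl_cons]
    by_cases hx : pvOdd x = true
    · rw [pvUpd_odd_step f b x hx]
      cases hzb : pvZ b with
      | some bv =>
        simp only [hzb]
        rw [pvUpd_foldl_zero f r (max bv x)]
        simp [List.filter_cons, hx]
      | none =>
        simp only [hzb]
        rw [pvUpd_foldl_zero f r x]
        simp [List.filter_cons, hx, List.headI]
    · have hx' : pvOdd x = false := by simpa using hx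
      have hfil : (x :: r).filter pvOdd = r.filter pvOdd := by simp [List.filter_cons, hx']
      have hr : (r.filter pvOdd).length > 0 := by rw [hfil] at h; exact h
      rw [ih _ hr, pvZ_pvUpd_even f b x hx', hfil]

-- with no odd element and one level of fuel, the fold is the identity
theorem pvUpd_foldl_fuel_one : ∀ (t : List Int) (b : Option (Nat × Int)),
    (∀ x ∈ t, pvOdd x = false) → t.foldl (pvUpd 1) b = b := by
  intro t
  induction t with
  | nil => intro b _; rfl
  | cons x r ih =>
    intro b h
    have hx := h x (by simp)
    have : pvUpd 1 b x = b := by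
      simp only [pvUpd, pvFirstOdd_of_even x 0 hx]
      simp [pvFirstOdd]
    rw [List.foldl_cons, this, ih _ (fun y hy => h y (by simp [hy]))]

-- with no odd element, one fold step at fuel f+2 is the shifted step at fuel f+1, up to level + 1
theorem pvUpd_foldl_shift (f : Nat) : ∀ (t : List Int) (b : Option (Nat × Int)),
    (∀ x ∈ t, pvOdd x = false) →
    t.foldl (pvUpd (f + 2)) (b.map fun p => (p.1 + 1, p.2))
      = ((t.map fun x => PySem.Int.floordiv x 10).foldl (pvUpd (f + 1)) b).map
          fun p => (p.1 + 1, p.2) := by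
  intro t
  induction t with
  | nil => intro b _; rfl
  | cons x r ih =>
    intro b h
    have hx := h x (by simp)
    have hstep : pvUpd (f + 2) (b.map fun p => (p.1 + 1, p.2)) x
        = (pvUpd (f + 1) b (PySem.Int.floordiv x 10)).map fun p => (p.1 + 1, p.2) := by
      simp only [pvUpd, pvFirstOdd_of_even x (f + 1) hx]
      cases pvFirstOdd (PySem.Int.floordiv x 10) (f + 1) with
      | none => rfl
      | some p =>
        rcases p with ⟨k, y⟩
        cases b with
        | none => rfl
        | some q =>
          rcases q with ⟨bk, bv⟩
          simp only [Option.map_some]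
          by_cases hc : k < bk ∨ (k = bk ∧ bv < y)
          · have hc' : k + 1 < bk + 1 ∨ (k + 1 = bk + 1 ∧ bv < y) := by omega
            simp [hc, hc']
          · have hc' : ¬(k + 1 < bk + 1 ∨ (k + 1 = bk + 1 ∧ bv < y)) := by omega
            simp [hc, hc']
    rw [List.foldl_cons, hstep, List.map_cons, List.foldl_cons,
      ih _ (fun y hy => h y (by simp [hy]))]

-- A's scan equals B's fold, for any list of candidates and matching fuel
theorem pvScan_eq_fold (m : Nat) : ∀ nums : List Int,
    pvScan nums (m + 1)
      = (match nums.foldl (pvUpd (m + 1)) none with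
          | none => (-1 : Int)
          | some (_, v) => v) := by
  induction m with
  | zero =>
    intro nums
    by_cases h : (nums.filter pvOdd).length > 0
    · rw [pvUpd_foldl_of_odd 0 nums none h, pvScan_succ]
      rcases hf : nums.filter pvOdd with _ | ⟨h1, t1⟩
      · rw [hf] at h; simp at h
      · simp [hf, PySem.List.max?_id_cons, pvZ, List.headI]
    · have hall : ∀ x ∈ nums, pvOdd x = false := by
        intro x hx
        by_contra hc
        have : x ∈ nums.filter pvOdd := List.mem_filter.mpr ⟨hx, by simpa using hc⟩
        have := List.length_pos_of_mem this
        omega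
      rw [pvUpd_foldl_fuel_one nums none hall, pvScan_succ, if_neg h]
      rfl
  | succ m ih =>
    intro nums
    by_cases h : (nums.filter pvOdd).length > 0
    · rw [pvUpd_foldl_of_odd (m + 1) nums none h, pvScan_succ]
      rcases hf : nums.filter pvOdd with _ | ⟨h1, t1⟩
      · rw [hf] at h; simp at h
      · simp [hf, PySem.List.max?_id_cons, pvZ, List.headI]
    · have hall : ∀ x ∈ nums, pvOdd x = false := by
        intro x hx
        by_contra hc
        have : x ∈ nums.filter pvOdd := List.mem_filter.mpr ⟨hx, by simpa using hc⟩
        have := List.length_pos_of_mem this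
        omega
      have hshift := pvUpd_foldl_shift m nums none hall
      simp only [Option.map_none] at hshift
      rw [pvScan_succ, if_neg h, ih, show m + 1 + 1 = m + 2 from rfl, hshift]
      cases (nums.map fun x => PySem.Int.floordiv x 10).foldl (pvUpd (m + 1)) none with
      | none => rfl
      | some p => rcases p with ⟨k, v⟩; rfl

-- B's best-accumulator update with a found (level, value) pair, in isolation
def pvM (b : Option (Nat × Int)) (p : Nat × Int) : Option (Nat × Int) :=
  match b with
  | none => some p
  | some q => if p.1 < q.1 ∨ (p.1 = q.1 ∧ q.2 < p.2) then some p else some q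

-- the two-candidate comparison is commutative
theorem pvM_comm (b : Option (Nat × Int)) (p q : Nat × Int) :
    pvM (pvM b p) q = pvM (pvM b q) p := by
  rcases p with ⟨pk, pv⟩
  rcases q with ⟨qk, qv⟩
  have hlex : ∀ (ak av bk bv : _), ¬((ak : Nat) < bk ∨ (ak = bk ∧ (bv : Int) < av)) →
      ¬(bk < ak ∨ (bk = ak ∧ av < bv)) → ak = bk ∧ av = bv := by
    intro ak av bk bv h1 h2
    rw [not_or] at h1 h2
    have hk : ak = bk := by omega
    refine ⟨hk, ?_⟩
    rcases lt_trichotomy av bv with h | h | h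
    · exact absurd ⟨hk.symm, h⟩ h2.2
    · exact h
    · exact absurd ⟨hk, h⟩ h1.2
  cases b with
  | none =>
    simp only [pvM]
    by_cases h1 : qk < pk ∨ (qk = pk ∧ pv < qv) <;>
      by_cases h2 : pk < qk ∨ (pk = qk ∧ qv < pv)
    · exfalso
      rcases h1 with h1 | ⟨h1a, h1b⟩ <;> rcases h2 with h2 | ⟨h2a, h2b⟩ <;> omega
    · simp [h1, h2]
    · simp [h1, h2]
    · rcases hlex qk qv pk pv h1 h2 with ⟨hk, hv⟩
      simp [h1, h2, hk, hv]
  | some r =>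
    rcases r with ⟨bk, bv⟩
    simp only [pvM]
    by_cases h1 : pk < bk ∨ (pk = bk ∧ bv < pv) <;>
      by_cases h2 : qk < bk ∨ (qk = bk ∧ bv < qv)
    · -- both beat b: reduces to the none case comparison
      simp only [if_pos h1, if_pos h2, pvM]
      by_cases h3 : qk < pk ∨ (qk = pk ∧ pv < qv) <;>
        by_cases h4 : pk < qk ∨ (pk = qk ∧ qv < pv)
      · exfalso
        rcases h3 with h3 | ⟨h3a, h3b⟩ <;> rcases h4 with h4 | ⟨h4a, h4b⟩ <;> omega
      · simp [h3, h4]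
      · simp [h3, h4]
      · rcases hlex qk qv pk pv h3 h4 with ⟨hk, hv⟩
        simp [h3, h4, hk, hv]
    · -- p beats b, q does not: q cannot beat p either
      have h3 : ¬(qk < pk ∨ (qk = pk ∧ pv < qv)) := by
        rw [not_or] at h2 ⊢
        rcases h1 with h1 | ⟨h1a, h1b⟩
        · exact ⟨by omega, by rintro ⟨he, hv⟩; omega⟩
        · refine ⟨by omega, ?_⟩
          rintro ⟨he, hv⟩
          exact h2.2 ⟨by omega, by omega⟩
      simp only [if_pos h1, if_neg h2, pvM, if_neg h3, if_pos h1]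
    · -- q beats b, p does not: p cannot beat q either
      have h4 : ¬(pk < qk ∨ (pk = qk ∧ qv < pv)) := by
        rw [not_or] at h1 ⊢
        rcases h2 with h2 | ⟨h2a, h2b⟩
        · exact ⟨by omega, by rintro ⟨he, hv⟩; omega⟩
        · refine ⟨by omega, ?_⟩
          rintro ⟨he, hv⟩
          exact h1.2 ⟨by omega, by omega⟩
      simp only [if_neg h1, if_pos h2, pvM, if_neg h4, if_pos h2]
    · simp only [if_neg h1, if_neg h2, pvM, if_neg h1, if_neg h2]

-- two pvUpd steps commute
theorem pvUpd_comm (f : Nat) (b : Option (Nat × Int)) (x y : Int) :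
    pvUpd f (pvUpd f b x) y = pvUpd f (pvUpd f b y) x := by
  have e : ∀ (b : Option (Nat × Int)) (z : Int), pvUpd f b z
      = match pvFirstOdd z f with | none => b | some p => pvM b p := by
    intro b z
    cases hz : pvFirstOdd z f with
    | none => simp [pvUpd, hz]
    | some p =>
      rcases p with ⟨k, v⟩
      cases b with
      | none => simp [pvUpd, hz, pvM]
      | some q => rcases q with ⟨bk, bv⟩; simp [pvUpd, hz, pvM]
  simp only [e]
  cases pvFirstOdd x f with
  | none => cases pvFirstOdd y f <;> rfl
  | some p =>
    cases pvFirstOdd y f with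
    | none => rfl
    | some q => exact pvM_comm b p q

-- B's paired fold is the flat fold over the interleaved candidate list
theorem pvFold_pairs (fuel : Nat) : ∀ (bases : List (List Char)) (b : Option (Nat × Int)),
    bases.foldl (fun b s => pvUpd fuel (pvUpd fuel b (pvInt s)) (pvRev (pvInt s))) b
      = (bases.flatMap fun s => [pvInt s, pvRev (pvInt s)]).foldl (pvUpd fuel) b := by
  intro bases
  induction bases with
  | nil => intro b; rfl
  | cons s r ih => intro b; simp [List.foldl_cons, ih]

-- take n as indexed reads (used to align A's cell loop with B's slice)
theorem pvMap_pyGetD_range_take {α : Type} (xs : List α) (d : α) (n : Nat) (h : n ≤ xs.length) :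
    ((PySem.List.pyRange 0 (n : Int)).map fun j => PySem.List.pyGetD xs j d) = xs.take n := by
  rw [PySem.List.pyRange_zero_natCast, List.map_map]
  apply List.ext_getElem
  · simpa using h
  · intro i h1 h2
    have h2' : i < xs.length := by
      have := List.getElem_mem h2
      simp at h2
      omega
    simp [PySem.List.pyGetD_natCast, List.getD_eq_getElem?_getD]
    rw [List.getElem?_eq_getElem h2']
    simp

theorem pvRange_filter_eq (N : Nat) (j : Int) (h0 : 0 ≤ j) (h1 : j < N) :
    (PySem.List.pyRange 0 (N : Int)).filter (fun i => i == j) = [j] := by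
  obtain ⟨jn, rfl⟩ : ∃ m : Nat, j = (m : Int) := ⟨j.toNat, by omega⟩
  have hjn : jn < N := by exact_mod_cast h1
  rw [PySem.List.pyRange_zero_natCast, List.filter_map]
  have hfun : (fun k : Nat => (((k : Int) == (jn : Int)) : Bool)) = (fun k : Nat => k == jn) := by
    funext k; by_cases h : k = jn <;> simp [h]
  have hcomp : ((fun i : Int => i == (jn : Int)) ∘ fun k : Nat => (k : Int))
      = (fun k : Nat => k == jn) := by
    funext k; by_cases h : k = jn <;> simp [h, Function.comp]
  rw [hcomp]
  have : (List.range N).filter (fun k => k == jn) = [jn] := by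
    clear h1
    induction N with
    | zero => omega
    | succ N ih =>
      rw [List.range_succ, List.filter_append]
      by_cases h : jn < N
      · have hN : ¬ ((N == jn) = true) := by simp; omega
        simp only [List.filter_cons, List.filter_nil, hN, if_neg hN]
        simp [ih h]
      · have hj : jn = N := by omega
        subst hj
        have : (List.range jn).filter (fun k => k == jn) = [] := by
          rw [List.filter_eq_nil_iff]
          intro a ha
          have : a < jn := List.mem_range.mp ha
          simp; omega
        simp [this]
  rw [this]
  simp

-- (pyRange 0 len).map (fun i => F (xs[i])) = xs.map F
theorem pvMapRange {α β : Type} (xs : List α) (d : α) (F : α → β) :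
    ((PySem.List.pyRange 0 ((xs.length : Int))).map fun i => F (PySem.List.pyGetD xs i d))
      = xs.map F := by
  conv_rhs => rw [← PySem.List.map_pyGetD_pyRange_zero xs d]
  rw [List.map_map]
  simp [Function.comp, PySem.List.len_eq]

theorem pvFlatMap_comp {α β γ : Type} (g : α → β) (F : β → List γ) (l : List α) :
    (l.flatMap fun x => F (g x)) = (l.map g).flatMap F := by
  induction l with
  | nil => rfl
  | cons x r ih => simp [List.flatMap_cons, ih]

-- (pyRange 0 len).flatMap (fun i => F (xs[i])) = xs.flatMap F
theorem pvFlatMapRange {α β : Type} (xs : List α) (d : α) (F : α → List β) :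
    ((PySem.List.pyRange 0 ((xs.length : Int))).flatMap fun i => F (PySem.List.pyGetD xs i d))
      = xs.flatMap F := by
  rw [pvFlatMap_comp (fun i => PySem.List.pyGetD xs i d) F]
  have := PySem.List.map_pyGetD_pyRange_zero xs d
  simp only [PySem.List.len_eq] at this
  rw [this]

-- the grid both ports read: first n characters of each of the n lines
def pvG (sopa : String) : List (List Char) :=
  (pvLines sopa).map fun ln => ln.take (pvLines sopa).length

theorem pvG_length (sopa : String) : (pvG sopa).length = (pvLines sopa).length := by
  simp [pvG]

def pvCol (sopa : String) (j : Int) : List Char :=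
  (pvG sopa).map fun ln => PySem.List.pyGetD ln j ' '

def pvD1 (sopa : String) : List Char :=
  (PySem.List.pyRange 0 (((pvLines sopa).length : Int))).map fun i =>
    PySem.List.pyGetD (PySem.List.pyGetD (pvG sopa) i []) i ' '

def pvD2 (sopa : String) : List Char :=
  (PySem.List.pyRange 0 (((pvLines sopa).length : Int))).map fun j =>
    PySem.List.pyGetD (PySem.List.pyGetD (pvG sopa) (((pvLines sopa).length : Int) - 1 - j) []) j ' '

def pvCore (sopa : String) : List Int :=
  ((pvG sopa) ++ (PySem.List.pyRange 0 (((pvLines sopa).length : Int))).map (pvCol sopa)).flatMap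
    fun s => [pvInt s, pvRev (pvInt s)]

-- under Pre_, every line is at least as long as the number of lines
theorem pvPre_len (sopa : String) (h : Pre_encuentra_maximo sopa) :
    ∀ ln ∈ pvLines sopa, (pvLines sopa).length ≤ ln.length := by
  intro ln hln
  unfold Pre_encuentra_maximo at h
  rw [List.all_eq_true] at h
  have := h ln hln
  simp at this
  exact this.1

theorem to_matriz_eq (sopa : String) (hpre : Pre_encuentra_maximo sopa) :
    to_matriz sopa = pvG sopa := by
  unfold to_matriz
  simp only [PySem.List.len_eq]
  rw [PySem.List.foldl_append_singleton_eq_map]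
  simp only [PySem.List.foldl_append_singleton_eq_map, List.nil_append]
  rw [pvMapRange (pvLines sopa) [] (fun ln =>
    ((PySem.List.pyRange 0 (((pvLines sopa).length : Int))).map fun j => PySem.List.pyGetD ln j ' '))]
  unfold pvG
  apply List.map_congr_left
  intro ln hln
  exact pvMap_pyGetD_range_take ln ' ' (pvLines sopa).length (pvPre_len sopa hpre ln hln)

-- the inner i-loop of A's column pass, characterised: column string, one diag1 cell, one diag2 cell
theorem pvInnerChar (sopa : String) (j : Int) (h0 : 0 ≤ j) (h1 : j < (((pvG sopa).length : Nat) : Int))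
    (d1 d2 : List Char) :
    (PySem.List.pyRange 0 (((pvG sopa).length : Nat) : Int)).foldl
      (fun (s : List Char × List Char × List Char) i =>
        (s.1 ++ [PySem.List.pyGetD (PySem.List.pyGetD (pvG sopa) i []) j ' '],
         if i == j then s.2.1 ++ [PySem.List.pyGetD (PySem.List.pyGetD (pvG sopa) i []) j ' '] else s.2.1,
         if i == |j - ((((pvG sopa).length : Nat) : Int) - 1)| then
           s.2.2 ++ [PySem.List.pyGetD (PySem.List.pyGetD (pvG sopa) i []) j ' '] else s.2.2))
      (([] : List Char), d1, d2)
    = ((pvG sopa).map (fun ln => PySem.List.pyGetD ln j ' '),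
       d1 ++ [PySem.List.pyGetD (PySem.List.pyGetD (pvG sopa) j []) j ' '],
       d2 ++ [PySem.List.pyGetD (PySem.List.pyGetD (pvG sopa) ((((pvG sopa).length : Nat) : Int) - 1 - j) []) j ' ']) := by
  have habs : |j - ((((pvG sopa).length : Nat) : Int) - 1)| = (((pvG sopa).length : Nat) : Int) - 1 - j := by
    rw [abs_of_nonpos (by omega)]; ring
  rw [habs]
  rw [PySem.List.foldl_prod_mk
    (fun (a : List Char) (i : Int) => a ++ [PySem.List.pyGetD (PySem.List.pyGetD (pvG sopa) i []) j ' '])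
    (fun (b : List Char × List Char) (i : Int) =>
      (if i == j then b.1 ++ [PySem.List.pyGetD (PySem.List.pyGetD (pvG sopa) i []) j ' '] else b.1,
       if i == (((pvG sopa).length : Nat) : Int) - 1 - j then
         b.2 ++ [PySem.List.pyGetD (PySem.List.pyGetD (pvG sopa) i []) j ' '] else b.2))]
  rw [PySem.List.foldl_prod_mk
    (fun (a : List Char) (i : Int) =>
      if i == j then a ++ [PySem.List.pyGetD (PySem.List.pyGetD (pvG sopa) i []) j ' '] else a)
    (fun (b : List Char) (i : Int) =>
      if i == (((pvG sopa).length : Nat) : Int) - 1 - j then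
        b ++ [PySem.List.pyGetD (PySem.List.pyGetD (pvG sopa) i []) j ' '] else b)]
  refine congrArg₂ Prod.mk ?_ (congrArg₂ Prod.mk ?_ ?_)
  · rw [PySem.List.foldl_append_singleton_eq_map, List.nil_append]
    exact pvMapRange (pvG sopa) [] (fun ln => PySem.List.pyGetD ln j ' ')
  · rw [PySem.List.foldl_append_if (fun i => i == j)
      (fun i => PySem.List.pyGetD (PySem.List.pyGetD (pvG sopa) i []) j ' ')]
    rw [pvRange_filter_eq (pvG sopa).length j h0 h1]
    simp
  · rw [PySem.List.foldl_append_if (fun i => i == (((pvG sopa).length : Nat) : Int) - 1 - j)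
      (fun i => PySem.List.pyGetD (PySem.List.pyGetD (pvG sopa) i []) j ' ')]
    rw [pvRange_filter_eq (pvG sopa).length ((((pvG sopa).length : Nat) : Int) - 1 - j)
      (by omega) (by omega)]
    simp

set_option maxHeartbeats 1600000 in
theorem pvLA (sopa : String) (hpre : Pre_encuentra_maximo sopa) :
    encuentra_maximo sopa
      = pvScan (pvCore sopa ++ [pvInt (pvD1 sopa), pvInt (pvD2 sopa),
          pvRev (pvInt (pvD1 sopa)), pvRev (pvInt (pvD2 sopa))]) ((pvLines sopa).length + 1) := by
  have hm := to_matriz_eq sopa hpre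
  unfold encuentra_maximo
  rw [hm]
  simp only [PySem.List.len_eq]
  -- rows loop becomes a flatMap over the grid
  rw [PySem.List.foldl_append_eq_flatMap (fun i =>
    [pvInt (PySem.List.pyGetD (pvG sopa) i []), pvRev (pvInt (PySem.List.pyGetD (pvG sopa) i []))])]
  rw [List.nil_append]
  rw [pvFlatMapRange (pvG sopa) [] (fun row => [pvInt row, pvRev (pvInt row)])]
  -- column/diagonal loop: replace the step by its characterisation
  rw [PySem.List.foldl_congr_mem (PySem.List.pyRange 0 (((pvG sopa).length : Nat) : Int)) _
    (fun (st : List Int × List Char × List Char) j =>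
      (st.1 ++ [pvInt ((pvG sopa).map (fun ln => PySem.List.pyGetD ln j ' ')),
                pvRev (pvInt ((pvG sopa).map (fun ln => PySem.List.pyGetD ln j ' ')))],
       st.2.1 ++ [PySem.List.pyGetD (PySem.List.pyGetD (pvG sopa) j []) j ' '],
       st.2.2 ++ [PySem.List.pyGetD (PySem.List.pyGetD (pvG sopa) ((((pvG sopa).length : Nat) : Int) - 1 - j) []) j ' ']))
    _
    (by
      intro st j hj
      rw [PySem.List.mem_pyRange_one] at hj
      exact congrArg (fun p : List Char × List Char × List Char =>
          (st.1 ++ [pvInt p.1, pvRev (pvInt p.1)], p.2.1, p.2.2))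
        (pvInnerChar sopa j hj.1 hj.2 st.2.1 st.2.2))]
  -- split the triple-state fold into three independent folds
  rw [PySem.List.foldl_prod_mk
    (fun (a : List Int) (j : Int) =>
      a ++ [pvInt ((pvG sopa).map (fun ln => PySem.List.pyGetD ln j ' ')),
            pvRev (pvInt ((pvG sopa).map (fun ln => PySem.List.pyGetD ln j ' ')))])
    (fun (b : List Char × List Char) (j : Int) =>
      (b.1 ++ [PySem.List.pyGetD (PySem.List.pyGetD (pvG sopa) j []) j ' '],
       b.2 ++ [PySem.List.pyGetD (PySem.List.pyGetD (pvG sopa) ((((pvG sopa).length : Nat) : Int) - 1 - j) []) j ' ']))]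
  rw [PySem.List.foldl_prod_mk
    (fun (a : List Char) (j : Int) => a ++ [PySem.List.pyGetD (PySem.List.pyGetD (pvG sopa) j []) j ' '])
    (fun (b : List Char) (j : Int) =>
      b ++ [PySem.List.pyGetD (PySem.List.pyGetD (pvG sopa) ((((pvG sopa).length : Nat) : Int) - 1 - j) []) j ' '])]
  rw [PySem.List.foldl_append_eq_flatMap (fun j =>
    [pvInt ((pvG sopa).map (fun ln => PySem.List.pyGetD ln j ' ')),
     pvRev (pvInt ((pvG sopa).map (fun ln => PySem.List.pyGetD ln j ' ')))])]
  rw [PySem.List.foldl_append_singleton_eq_map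
    (fun j => PySem.List.pyGetD (PySem.List.pyGetD (pvG sopa) j []) j ' ')]
  rw [PySem.List.foldl_append_singleton_eq_map
    (fun j => PySem.List.pyGetD (PySem.List.pyGetD (pvG sopa) ((((pvG sopa).length : Nat) : Int) - 1 - j) []) j ' ')]
  rw [List.nil_append, List.nil_append]
  simp only [pvG_length]
  -- identify the pieces with pvCore / pvD1 / pvD2
  have hcore : (pvG sopa).flatMap (fun row => [pvInt row, pvRev (pvInt row)]) ++
      (PySem.List.pyRange 0 (((pvLines sopa).length : Nat) : Int)).flatMap (fun j =>
        [pvInt ((pvG sopa).map (fun ln => PySem.List.pyGetD ln j ' ')),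
         pvRev (pvInt ((pvG sopa).map (fun ln => PySem.List.pyGetD ln j ' ')))])
      = pvCore sopa := by
    unfold pvCore
    rw [List.flatMap_append, List.flatMap_map]
    rfl
  have hd1 : ((PySem.List.pyRange 0 (((pvLines sopa).length : Nat) : Int)).map
      (fun j => PySem.List.pyGetD (PySem.List.pyGetD (pvG sopa) j []) j ' ')) = pvD1 sopa := rfl
  have hd2 : ((PySem.List.pyRange 0 (((pvLines sopa).length : Nat) : Int)).map
      (fun j => PySem.List.pyGetD (PySem.List.pyGetD (pvG sopa) ((((pvLines sopa).length : Nat) : Int) - 1 - j) []) j ' ')) = pvD2 sopa := rfl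
  rw [hcore, hd1, hd2]
  -- the selection phase is pvScan with fuel n+1
  rw [pvScan_succ, pvLevelLoop_eq_pvScan (pvLines sopa).length]

theorem pvLB (sopa : String) :
    encuentra_maximo_alt sopa
      = (match (pvCore sopa ++ [pvInt (pvD1 sopa), pvRev (pvInt (pvD1 sopa)),
            pvInt (pvD2 sopa), pvRev (pvInt (pvD2 sopa))]).foldl
            (pvUpd ((pvLines sopa).length + 1)) none with
          | none => (-1 : Int)
          | some (_, v) => v) := by
  unfold encuentra_maximo_alt
  simp only [PySem.List.slice_to_natCast]
  rw [pvFold_pairs]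
  simp [pvCore, pvCol, pvD1, pvD2, pvG, List.flatMap_append, List.flatMap_map,
    List.flatMap_cons, List.flatMap_nil]

-- ===== VERDICT (by name: the statement is the Claim_ definition above) =====
theorem encuentra_maximo_spec : Claim_equal_encuentra_maximo := by
  intro sopa _ hpre
  unfold Spec_encuentra_maximo
  rw [pvLA sopa hpre, pvLB sopa, pvScan_eq_fold (pvLines sopa).length]
  rw [List.foldl_append, List.foldl_append]
  simp only [List.foldl_cons, List.foldl_nil]
  rw [pvUpd_comm ((pvLines sopa).length + 1) _ (pvInt (pvD2 sopa)) (pvRev (pvInt (pvD1 sopa)))]
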